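-- pv_equiv track=rewrite | github.com/NLPWM-WHU/CATUS | POI_data_cross_city_process_FlashBack.py | generate_segment
-- ===== SOURCE A (Python) =====
-- def generate_segment(current_sentence_time, interval_time):
--     current_sentence_segment = []
--     begin1 = 1
--     current_time = current_sentence_time[0]
--     for idx, time in enumerate(current_sentence_time):
--         if time - current_time < interval_time:
--             current_sentence_segment.append(begin1)
--         else:
--             begin1 += 1
--             current_time = time
--             current_sentence_segment.append(begin1)
--     return current_sentence_segment
-- ===== SOURCE B (Python) =====
-- def generate_segment(current_sentence_time, interval_time):
--     # Phase 1: collect the indices at which the segment label increments.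
--     resets = []
--     anchor = current_sentence_time[0]
--     for i, t in enumerate(current_sentence_time):
--         if t - anchor >= interval_time:
--             resets.append(i)
--             anchor = t
--     # Phase 2: run-length expansion between consecutive boundaries.
--     out = []
--     prev = 0
--     for k, b in enumerate(resets + [len(current_sentence_time)]):
--         out.extend([k + 1] * (b - prev))
--         prev = b
--     return out
-- ===== Notes on version B (the rewrite author's own statement) =====
-- stated objective: alternative
-- what changed: Replaced A's single stateful loop (label + anchor carried while appending) by a two-phase algorithm: first collect the indices where the label increments, then build the output by run-length expansion between consecutive boundaries.
import Mathlib
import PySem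

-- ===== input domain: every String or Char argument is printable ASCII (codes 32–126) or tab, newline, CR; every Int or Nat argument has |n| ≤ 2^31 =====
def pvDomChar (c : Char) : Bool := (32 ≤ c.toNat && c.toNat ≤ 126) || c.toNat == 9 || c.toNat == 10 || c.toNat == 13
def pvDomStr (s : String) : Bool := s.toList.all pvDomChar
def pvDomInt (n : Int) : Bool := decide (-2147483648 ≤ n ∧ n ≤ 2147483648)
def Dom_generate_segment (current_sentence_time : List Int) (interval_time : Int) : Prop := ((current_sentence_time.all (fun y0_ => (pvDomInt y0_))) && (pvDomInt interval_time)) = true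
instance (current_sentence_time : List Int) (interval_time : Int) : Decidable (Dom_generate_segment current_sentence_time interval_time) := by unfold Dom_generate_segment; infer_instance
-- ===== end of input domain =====

-- B replaces A's single stateful labelling loop by two phases — collect the reset
-- indices, then run-length-expand the runs between consecutive boundaries (alternative
-- decomposition, same cost). Equivalence is about the return value only.

-- ===== PORT A =====
-- A's loop: state (segment so far, current label begin1, current anchor time).
def generate_segment (current_sentence_time : List Int) (interval_time : Int) : List Int :=
  match current_sentence_time with
  | [] => []  -- Python raises IndexError on [] (current_sentence_time[0]); excluded by Pre_
  | t0 :: _ =>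
    (current_sentence_time.foldl
      (fun (st : List Int × Int × Int) time =>
        let (seg, begin1, current_time) := st
        if time - current_time < interval_time then
          (seg ++ [begin1], begin1, current_time)
        else
          (seg ++ [begin1 + 1], begin1 + 1, time))
      ([], 1, t0)).1

-- ===== PORT B =====
def generate_segment_alt (current_sentence_time : List Int) (interval_time : Int) : List Int :=
  match current_sentence_time with
  | [] => []  -- Python raises IndexError on [] (current_sentence_time[0]); excluded by Pre_
  | t0 :: _ =>
    -- Phase 1: collect the indices at which the segment label increments.
    let p1 := (PySem.List.enumerate current_sentence_time).foldl
      (fun (st : List Int × Int) (p : Int × Int) =>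
        let (resets, anchor) := st
        if p.2 - anchor ≥ interval_time then (resets ++ [p.1], p.2) else (resets, anchor))
      ([], t0)
    -- Phase 2: run-length expansion between consecutive boundaries.
    ((PySem.List.enumerate (p1.1 ++ [(current_sentence_time.length : Int)])).foldl
      (fun (st : List Int × Int) (p : Int × Int) =>
        let (out, prev) := st
        (out ++ List.replicate (p.2 - prev).toNat (p.1 + 1), p.2))
      ([], 0)).1

-- ===== PRECONDITION & SPEC =====
-- Pre_ excludes only the empty list, on which the Python A raises IndexError.
def Pre_generate_segment (current_sentence_time : List Int) (interval_time : Int) : Prop :=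
  current_sentence_time ≠ []
instance (current_sentence_time : List Int) (interval_time : Int) : Decidable (Pre_generate_segment current_sentence_time interval_time) := by unfold Pre_generate_segment; infer_instance
def pvWitness_generate_segment : List Int × Int := ([0, 3, 4, 10], 4)

def Spec_generate_segment (current_sentence_time : List Int) (interval_time : Int) (out : List Int) : Prop := out = generate_segment_alt current_sentence_time interval_time
instance (current_sentence_time : List Int) (interval_time : Int) (out : List Int) : Decidable (Spec_generate_segment current_sentence_time interval_time out) := by unfold Spec_generate_segment; infer_instance

-- ===== CLAIM (what is proved, stated in full; the proofs are below) =====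
def Claim_equal_generate_segment : Prop := ∀ (current_sentence_time : List Int) (interval_time : Int), Dom_generate_segment current_sentence_time interval_time → Pre_generate_segment current_sentence_time interval_time → Spec_generate_segment current_sentence_time interval_time (generate_segment current_sentence_time interval_time)

-- ===== LEMMAS AND PROOFS =====

-- Reference scan: the label sequence, recursively (label l, anchor a).
def goSeg (it : Int) : List Int → Int → Int → List Int
  | [], _, _ => []
  | t :: r, l, a =>
    if t - a < it then l :: goSeg it r l a else (l + 1) :: goSeg it r (l + 1) t

-- A's fold accumulates exactly goSeg.
theorem foldA_eq_goSeg (it : Int) (ts : List Int) :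
    ∀ (seg : List Int) (l a : Int),
      (ts.foldl
        (fun (st : List Int × Int × Int) time =>
          let (seg, begin1, current_time) := st
          if time - current_time < it then
            (seg ++ [begin1], begin1, current_time)
          else
            (seg ++ [begin1 + 1], begin1 + 1, time))
        (seg, l, a)).1 = seg ++ goSeg it ts l a := by
  induction ts with
  | nil => intro seg l a; simp [goSeg]
  | cons t r ih =>
    intro seg l a
    simp only [List.foldl_cons, goSeg]
    by_cases h : t - a < it
    · simp only [if_pos h]; rw [ih]; simp
    · simp only [if_neg h]; rw [ih]; simp

-- B phase 1, recursively: indices (from i) where the label increments.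
def resetsR (it : Int) : List Int → Int → Int → List Int
  | [], _, _ => []
  | t :: r, a, i =>
    if t - a ≥ it then i :: resetsR it r t (i + 1) else resetsR it r a (i + 1)

theorem fold1_eq_resetsR (it : Int) (ts : List Int) :
    ∀ (rs : List Int) (a i : Int),
      (((PySem.List.enumerate ts i).foldl
        (fun (st : List Int × Int) (p : Int × Int) =>
          let (resets, anchor) := st
          if p.2 - anchor ≥ it then (resets ++ [p.1], p.2) else (resets, anchor))
        (rs, a))).1 = rs ++ resetsR it ts a i := by
  induction ts with
  | nil => intro rs a i; simp [PySem.List.enumerate_nil, resetsR]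
  | cons t r ih =>
    intro rs a i
    simp only [PySem.List.enumerate_cons, List.foldl_cons, resetsR]
    by_cases h : t - a ≥ it
    · simp only [if_pos h]; rw [ih]; simp
    · simp only [if_neg h]; rw [ih]

-- B phase 2, recursively: run-length expansion of the boundary list.
def expandR : List Int → Int → Int → List Int
  | [], _, _ => []
  | b :: bs, k, prev => List.replicate (b - prev).toNat (k + 1) ++ expandR bs (k + 1) b

theorem fold2_eq_expandR (bs : List Int) :
    ∀ (out : List Int) (k prev : Int),
      (((PySem.List.enumerate bs k).foldl
        (fun (st : List Int × Int) (p : Int × Int) =>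
          let (out, prev) := st
          (out ++ List.replicate (p.2 - prev).toNat (p.1 + 1), p.2))
        (out, prev))).1 = out ++ expandR bs k prev := by
  induction bs with
  | nil => intro out k prev; simp [PySem.List.enumerate_nil, expandR]
  | cons b bs ih =>
    intro out k prev
    simp only [PySem.List.enumerate_cons, List.foldl_cons, expandR]
    rw [ih]
    simp

-- Every reset index produced from start i is ≥ i.
theorem resetsR_ge (it : Int) (ts : List Int) :
    ∀ (a i b : Int), b ∈ resetsR it ts a i → i ≤ b := by
  induction ts with
  | nil => intro a i b hb; simp [resetsR] at hb
  | cons t r ih =>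
    intro a i b hb
    simp only [resetsR] at hb
    by_cases h : t - a ≥ it
    · rw [if_pos h] at hb
      rcases List.mem_cons.mp hb with h1 | h1
      · omega
      · have := ih t (i + 1) b h1; omega
    · rw [if_neg h] at hb
      have := ih a (i + 1) b hb; omega

-- Peeling one position off the front of the first run.
theorem expandR_shift (b : Int) (bs : List Int) (k prev : Int) (h : prev < b) :
    expandR (b :: bs) k prev = (k + 1) :: expandR (b :: bs) k (prev + 1) := by
  simp only [expandR]
  have h1 : (b - prev).toNat = (b - (prev + 1)).toNat + 1 := by omega
  rw [h1, List.replicate_succ]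
  simp

-- The head of 'resetsR … (i+1) ++ [final bound]' is > i.
theorem head_bound_gt (it : Int) (r : List Int) (t i b : Int) (bs : List Int)
    (hbs : resetsR it r t (i + 1) ++ [i + 1 + (r.length : Int)] = b :: bs) : i < b := by
  cases hr : resetsR it r t (i + 1) with
  | nil => rw [hr] at hbs; simp at hbs; have := Int.natCast_nonneg r.length; omega
  | cons x xs =>
    rw [hr] at hbs
    simp only [List.cons_append, List.cons.injEq] at hbs
    have hx : x ∈ resetsR it r t (i + 1) := by rw [hr]; exact List.mem_cons_self ..
    have := resetsR_ge it r t (i + 1) x hx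
    omega

-- Main bridge: expanding resets (from index i) plus the final bound gives goSeg.
theorem expand_resets_eq_goSeg (it : Int) (ts : List Int) :
    ∀ (a i k : Int),
      expandR (resetsR it ts a i ++ [i + (ts.length : Int)]) k i
        = goSeg it ts (k + 1) a := by
  induction ts with
  | nil => intro a i k; simp [resetsR, goSeg, expandR]
  | cons t r ih =>
    intro a i k
    simp only [resetsR, goSeg, List.length_cons]
    have hlen : i + ((r.length : Int) + 1) = i + 1 + (r.length : Int) := by ring
    push_cast
    by_cases h : t - a ≥ it
    · rw [if_pos h, if_neg (by omega)]
      simp only [List.cons_append, expandR]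
      have hsub : (i - i).toNat = 0 := by omega
      rw [hsub]
      simp only [List.replicate_zero, List.nil_append]
      rw [hlen]
      cases hbs : resetsR it r t (i + 1) ++ [i + 1 + (r.length : Int)] with
      | nil => exact absurd hbs (by simp)
      | cons b bs' =>
        rw [expandR_shift b bs' (k + 1) i (head_bound_gt it r t i b bs' hbs)]
        rw [← hbs, ih t (i + 1) (k + 1)]
    · rw [if_neg h, if_pos (by omega)]
      rw [hlen]
      cases hbs : resetsR it r a (i + 1) ++ [i + 1 + (r.length : Int)] with
      | nil => exact absurd hbs (by simp)
      | cons b bs' =>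
        rw [expandR_shift b bs' k i (head_bound_gt it r a i b bs' hbs)]
        rw [← hbs, ih a (i + 1) k]

-- ===== VERDICT (by name: the statement is the Claim_ definition above) =====
theorem generate_segment_spec : Claim_equal_generate_segment := by
  intro ts it _ hpre
  unfold Spec_generate_segment
  match ts, hpre with
  | t0 :: r, _ =>
    show generate_segment (t0 :: r) it = generate_segment_alt (t0 :: r) it
    unfold generate_segment generate_segment_alt
    simp only
    rw [foldA_eq_goSeg, fold2_eq_expandR, fold1_eq_resetsR]
    simp only [List.nil_append]
    have := expand_resets_eq_goSeg it (t0 :: r) t0 0 0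
    simp only [zero_add] at this ⊢
    rw [this]
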